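-- pv_equiv track=rewrite | github.com/guoer9/alpha-agent | alpha_agent/selection/factor_cleaner.py | adapt_field_references
-- ===== SOURCE A (Python) =====
-- FIELD_ALIASES = {
--     # 价格相关
--     'Close': 'close',
--     'CLOSE': 'close',
--     'Open': 'open',
--     'OPEN': 'open',
--     'High': 'high',
--     'HIGH': 'high',
--     'Low': 'low',
--     'LOW': 'low',
--     # 成交量相关
--     'Volume': 'volume',
--     'VOLUME': 'volume',
--     'vol': 'volume',
--     'Vol': 'volume',
--     'VOL': 'volume',
--     # 成交额
--     'Amount': 'amount',
--     'AMOUNT': 'amount',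
--     'amt': 'amount',
--     # 换手率
--     'Turnover': 'turnover',
--     'TURNOVER': 'turnover',
--     'turn': 'turnover',
--     'Turn': 'turnover',
--     # 收益率
--     'ret': 'returns',
--     'Ret': 'returns',
--     'RET': 'returns',
--     'Return': 'returns',
--     'RETURN': 'returns',
--     # VWAP
--     'VWAP': 'vwap',
--     'Vwap': 'vwap',
-- }
--
-- def adapt_field_references(code: str) -> tuple[str, int]:
--     """
--     适配字段引用，将别名转换为标准字段名
--
--     Args:
--         code: 原始代码
--
--     Returns:
--         (适配后代码, 适配的字段数量)
--     """
--     if not code: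
--         return code, 0
--
--     adapted_count = 0
--     result = code
--
--     for alias, standard in FIELD_ALIASES.items():
--         # 匹配 df['alias'] 或 df["alias"] 格式
--         patterns = [
--             (f"['{alias}']", f"['{standard}']"),
--             (f'["{alias}"]', f'["{standard}"]'),
--         ]
--
--         for old, new in patterns:
--             if old in result:
--                 result = result.replace(old, new)
--                 adapted_count += 1
--
--     return result, adapted_count
-- ===== SOURCE B (Python) =====
-- # B: single left-to-right scan over the code (one pass instead of 54 replace passes);
-- # whose word is an alias, collecting the distinct (word, quote) pairs seen.
-- FIELD_ALIASES = {
--     'Close': 'close', 'CLOSE': 'close',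
--     'Open': 'open', 'OPEN': 'open',
--     'High': 'high', 'HIGH': 'high',
--     'Low': 'low', 'LOW': 'low',
--     'Volume': 'volume', 'VOLUME': 'volume', 'vol': 'volume', 'Vol': 'volume', 'VOL': 'volume',
--     'Amount': 'amount', 'AMOUNT': 'amount', 'amt': 'amount',
--     'Turnover': 'turnover', 'TURNOVER': 'turnover', 'turn': 'turnover', 'Turn': 'turnover',
--     'ret': 'returns', 'Ret': 'returns', 'RET': 'returns', 'Return': 'returns', 'RETURN': 'returns',
--     'VWAP': 'vwap', 'Vwap': 'vwap',
-- }
--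
-- def adapt_field_references(code: str) -> tuple[str, int]:
--     if not code:
--         return code, 0
--     out = []
--     seen = set()
--     i = 0
--     n = len(code)
--     while i < n:
--         c = code[i]
--         if c == '[' and i + 1 < n and code[i + 1] in ("'", '"'):
--             q = code[i + 1]
--             j = i + 2
--             while j < n and (code[j].isalnum() or code[j] == '_'):
--                 j += 1
--             word = code[i + 2:j]
--             if word and j + 1 < n and code[j] == q and code[j + 1] == ']' and word in FIELD_ALIASES:
--                 out.append('[' + q + FIELD_ALIASES[word] + q + ']')
--                 seen.add((word, q))
--                 i = j + 2
--                 continue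
--         out.append(c)
--         i += 1
--     return ''.join(out), len(seen)
-- ===== Notes on version B (the rewrite author's own statement) =====
-- stated objective: alternative
-- what changed: A makes 54 sequential whole-string containment tests and replace passes (one per alias/quote pattern); B makes a single left-to-right tokenizing scan that parses each [quote word quote] token once, rewrites it via one dictionary lookup, and counts the distinct (word, quote) pairs in a set.
import Mathlib
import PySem

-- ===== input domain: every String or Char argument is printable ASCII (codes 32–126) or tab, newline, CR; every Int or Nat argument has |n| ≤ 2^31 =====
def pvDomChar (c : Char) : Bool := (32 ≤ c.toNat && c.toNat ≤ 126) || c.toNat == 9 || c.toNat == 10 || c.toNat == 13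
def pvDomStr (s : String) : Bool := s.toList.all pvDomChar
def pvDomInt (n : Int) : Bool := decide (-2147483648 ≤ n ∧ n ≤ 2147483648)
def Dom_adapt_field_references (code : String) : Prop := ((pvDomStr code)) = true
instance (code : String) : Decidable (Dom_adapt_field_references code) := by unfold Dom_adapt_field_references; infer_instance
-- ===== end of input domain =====

-- B replaces A's 54 sequential whole-string `in`/replace passes (one per alias/quote pattern)
-- with ONE left-to-right tokenizing scan that rewrites each [quote word quote] token whose word
-- is an alias and counts the distinct (word, quote) pairs seen (objective: alternative algorithm).

-- ===== PORT A =====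
def pvAliasItems : List (String × String) := [("Close","close"),("CLOSE","close"),("Open","open"),("OPEN","open"),("High","high"),("HIGH","high"),("Low","low"),("LOW","low"),("Volume","volume"),("VOLUME","volume"),("vol","volume"),("Vol","volume"),("VOL","volume"),("Amount","amount"),("AMOUNT","amount"),("amt","amount"),("Turnover","turnover"),("TURNOVER","turnover"),("turn","turnover"),("Turn","turnover"),("ret","returns"),("Ret","returns"),("RET","returns"),("Return","returns"),("RETURN","returns"),("VWAP","vwap"),("Vwap","vwap")]

def pvStepX (st : List Char × Int) (pr : List Char × List Char) : List Char × Int :=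
  if PySem.Chars.isIn pr.1 st.1 then (PySem.Chars.replace st.1 pr.1 pr.2, st.2 + 1) else st

def adapt_field_references (code : String) : String × Int :=
  if code = "" then (code, 0)
  else
    let st := pvAliasItems.foldl (fun st p =>
      [ ('[' :: '\'' :: p.1.toList ++ ['\'', ']'], '[' :: '\'' :: p.2.toList ++ ['\'', ']']),
        ('[' :: '"' :: p.1.toList ++ ['"', ']'], '[' :: '"' :: p.2.toList ++ ['"', ']']) ].foldl pvStepX st)
      (code.toList, 0)
    (String.ofList st.1, st.2)


-- ===== PORT B =====
def pvWordChar (c : Char) : Bool := PySem.Chars.isalnum c || c == '_'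

def pvLookup (w : List Char) : Option (List Char) :=
  (pvAliasItems.find? (fun p => p.1.toList == w)).map (fun p => p.2.toList)

def pvScanGo : Nat → List Char → List Char → PySem.Set (List Char × Char) → List Char × PySem.Set (List Char × Char)
  | _, [], out, seen => (out, seen)
  | 0, _, out, seen => (out, seen)
  | fuel+1, c :: t, out, seen =>
    match t with
    | q :: rest =>
      if c = '[' ∧ (q = '\'' ∨ q = '"') then
        let w := rest.takeWhile pvWordChar
        match rest.drop w.length with
        | q2 :: b :: rest' =>
          if w ≠ [] ∧ q2 = q ∧ b = ']' then
            match pvLookup w with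
            | some std => pvScanGo fuel rest' (out ++ ('[' :: q :: std ++ [q, ']'])) (PySem.Set.add seen (w, q))
            | none => pvScanGo fuel t (out ++ [c]) seen
          else pvScanGo fuel t (out ++ [c]) seen
        | _ => pvScanGo fuel t (out ++ [c]) seen
      else pvScanGo fuel t (out ++ [c]) seen
    | [] => pvScanGo fuel t (out ++ [c]) seen

def adapt_field_references_alt (code : String) : String × Int :=
  if code = "" then (code, 0)
  else
    let r := pvScanGo code.toList.length code.toList [] PySem.Set.empty
    (String.ofList r.1, PySem.Set.len r.2)


-- ===== PRECONDITION & SPEC =====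
def Spec_adapt_field_references (code : String) (out : String × Int) : Prop := out = adapt_field_references_alt code
instance (code : String) (out : String × Int) : Decidable (Spec_adapt_field_references code out) := by unfold Spec_adapt_field_references; infer_instance

-- ===== CLAIM (what is proved, stated in full; the proofs are below) =====
def Claim_equal_adapt_field_references : Prop := ∀ (code : String), Dom_adapt_field_references code → Spec_adapt_field_references code (adapt_field_references code)

-- ===== LEMMAS AND PROOFS =====

def pvRepl (o : Char) (old' new : List Char) : List Char → List Char
  | [] => []
  | c :: t =>
    if (o :: old').isPrefixOf (c :: t) then new ++ pvRepl o old' new (t.drop old'.length)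
    else c :: pvRepl o old' new t
  termination_by l => l.length
  decreasing_by all_goals (simp; try omega)

theorem pvRepl_nil (o : Char) (old' new : List Char) : pvRepl o old' new [] = [] := by
  rw [pvRepl]

theorem pvRepl_cons (o : Char) (old' new : List Char) (c : Char) (t : List Char) :
    pvRepl o old' new (c :: t) =
      if (o :: old').isPrefixOf (c :: t) then new ++ pvRepl o old' new (t.drop old'.length)
      else c :: pvRepl o old' new t := by
  rw [pvRepl]

theorem pvGoSpec (o : Char) (old' new : List Char) :
    ∀ (fuel : Nat) (l acc : List Char), l.length ≤ fuel →
      PySem.Chars.replace.go (o :: old') new fuel l acc = acc.reverse ++ pvRepl o old' new l := by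
  intro fuel
  induction fuel with
  | zero => intro l acc h; have : l = [] := by cases l <;> simp_all
            subst this; simp [PySem.Chars.replace.go, pvRepl_nil]
  | succ n ih =>
    intro l acc h
    cases l with
    | nil => simp [PySem.Chars.replace.go, pvRepl_nil]
    | cons c t =>
      rw [PySem.Chars.replace.go, pvRepl_cons]
      by_cases hp : (o :: old').isPrefixOf (c :: t) = true
      · simp only [hp, if_pos]
        rw [ih _ _ (by have := List.length_drop (l := t) (i := old'.length); simp at h ⊢; omega)]
        simp
      · simp only [hp, Bool.false_eq_true, if_neg, not_false_eq_true]
        rw [ih _ _ (by simp at h ⊢; omega)]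
        simp

theorem pvReplaceEq (o : Char) (old' new s : List Char) :
    PySem.Chars.replace s (o :: old') new = pvRepl o old' new s := by
  rw [PySem.Chars.replace]
  simp [pvGoSpec o old' new s.length s [] le_rfl]

def pvPat (q : Char) (w : List Char) : List Char := '[' :: q :: w ++ [q, ']']

abbrev pvQuote (q : Char) : Prop := q = '\'' ∨ q = '"'

abbrev pvWok (w : List Char) : Prop := w ≠ [] ∧ w.all pvWordChar = true

inductive PvAtom where
  | chr : Char → PvAtom
  | tok : Char → List Char → PvAtom
deriving DecidableEq, Repr

def pvFlat : List PvAtom → List Char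
  | [] => []
  | .chr c :: r => c :: pvFlat r
  | .tok q w :: r => pvPat q w ++ pvFlat r

-- interior of a pattern has no '['
theorem pvWordChar_ne (c : Char) (h : pvWordChar c = true) : c ≠ '[' ∧ c ≠ '\'' ∧ c ≠ '"' ∧ c ≠ ']' := by
  refine ⟨?_, ?_, ?_, ?_⟩ <;> (rintro rfl; revert h; decide)

theorem pvPat_interior (q : Char) (w : List Char) (hq : pvQuote q) (hw : w.all pvWordChar = true)
    (i : Nat) (hi : 0 < i) : (pvPat q w)[i]? ≠ some '[' := by
  intro hsome
  have hmem : '[' ∈ q :: w ++ [q, ']'] := by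
    have : (pvPat q w)[i]? = (q :: w ++ [q, ']'])[i-1]? := by
      unfold pvPat
      cases i with
      | zero => omega
      | succ j => simp
    rw [this] at hsome
    exact List.mem_of_getElem? hsome
  have hqB : '[' ≠ q := by rcases hq with rfl | rfl <;> decide
  have hwB : '[' ∉ w := by
    intro hm
    have := List.all_eq_true.mp hw _ hm
    revert this; decide
  simp at hmem
  rcases hmem with h | h | h <;> [exact hqB h; exact hwB h; exact hqB h]

-- a prefix cannot run past u into a region starting with '['
theorem pvPrefixStop (p u v : List Char) (hu : u ≠ [])
    (hv : v = [] ∨ v[0]? = some '[') (hp : ∀ i, 0 < i → p[i]? ≠ some '[') :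
    p <+: u ++ v ↔ p <+: u := by
  constructor
  · intro h
    by_cases hlen : p.length ≤ u.length
    · have heq : p = (u ++ v).take p.length := List.prefix_iff_eq_take.mp h
      rw [List.take_append_of_le_length hlen] at heq
      rw [heq]
      exact List.take_prefix _ _
    · rcases hv with rfl | hv
      · rw [List.append_nil] at h; exact h
      · exfalso
        obtain ⟨r, hr⟩ := h
        have h1 : p[u.length]? = some '[' := by
          have : (p ++ r)[u.length]? = p[u.length]? := List.getElem?_append_left (by omega)
          rw [hr] at this
          rw [← this]
          rw [List.getElem?_append_right (by omega)]
          simpa using hv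
        exact hp u.length (by cases u <;> simp_all) h1
  · intro h; exact h.trans (List.prefix_append u v)

-- walk lemmas
theorem pvRepl_append (o : Char) (old' new : List Char) (u z : List Char)
    (h : ∀ k, k < u.length → ¬ (o :: old') <+: (u.drop k ++ z)) :
    pvRepl o old' new (u ++ z) = u ++ pvRepl o old' new z := by
  induction u with
  | nil => simp
  | cons c u' ih =>
    rw [List.cons_append, pvRepl_cons]
    have h0 : ¬ (o :: old').isPrefixOf (c :: (u' ++ z)) = true := by
      rw [List.isPrefixOf_iff_prefix]
      have := h 0 (by simp)
      simpa using this
    simp only [h0, Bool.false_eq_true, if_neg, not_false_eq_true]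
    rw [ih (fun k hk => by simpa using h (k+1) (by simpa using hk))]
    simp

theorem pvInfix_append_iff (p u z : List Char) :
    p <:+: u ++ z ↔ (∃ k, k < u.length ∧ p <+: (u.drop k ++ z)) ∨ p <:+: z := by
  induction u with
  | nil => simp
  | cons c u' ih =>
    rw [List.cons_append, List.infix_cons_iff, ih]
    constructor
    · rintro (h | ⟨k, hk, h⟩ | h)
      · exact Or.inl ⟨0, by simp, by simpa using h⟩
      · exact Or.inl ⟨k+1, by simpa using hk, by simpa using h⟩
      · exact Or.inr h
    · rintro (⟨k, hk, h⟩ | h)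
      · cases k with
        | zero => exact Or.inl (by simpa using h)
        | succ k' => exact Or.inr (Or.inl ⟨k', by simpa using hk, by simpa using h⟩)
      · exact Or.inr (Or.inr h)

-- words terminated by a quote: distinct words make the prefix impossible
theorem pvWordTerm (q : Char) : ∀ (a w : List Char), q ∉ a → q ∉ w → a ≠ w →
    ∀ (x y : List Char), ¬ (a ++ q :: x) <+: (w ++ q :: y) := by
  intro a
  induction a with
  | nil =>
    intro w _ hw hne x y hpre
    cases w with
    | nil => exact hne rfl
    | cons d w' =>
      simp only [List.nil_append, List.cons_append, List.cons_prefix_cons] at hpre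
      exact hw (by simp [hpre.1])
  | cons c a' ih =>
    intro w ha hw hne x y hpre
    cases w with
    | nil =>
      simp only [List.cons_append, List.nil_append, List.cons_prefix_cons] at hpre
      exact ha (by simp [hpre.1])
    | cons d w' =>
      simp only [List.cons_append, List.cons_prefix_cons] at hpre
      obtain ⟨rfl, hpre'⟩ := hpre
      exact ih w' (by simp_all) (by simp_all) (by intro hh; exact hne (by rw [hh])) x y hpre'

-- distinct tokens: one token's pattern is never a prefix of another token followed by anything
theorem pvTokNePrefix (q q' : Char) (a w : List Char) (hq : pvQuote q) (hq' : pvQuote q')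
    (ha : pvWok a) (hw : pvWok w) (hne : ¬ (q = q' ∧ a = w)) (z : List Char) :
    ¬ pvPat q a <+: pvPat q' w ++ z := by
  intro hpre
  unfold pvPat at hpre
  simp only [List.cons_append, List.cons_prefix_cons, List.append_assoc] at hpre
  obtain ⟨-, hq2, hpre'⟩ := hpre
  subst hq2
  have hqa : q ∉ a := by
    intro hm
    have h2 := pvWordChar_ne q (List.all_eq_true.mp ha.2 _ hm)
    rcases hq with rfl | rfl
    · exact h2.2.1 rfl
    · exact h2.2.2.1 rfl
  have hqw : q ∉ w := by
    intro hm
    have h2 := pvWordChar_ne q (List.all_eq_true.mp hw.2 _ hm)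
    rcases hq with rfl | rfl
    · exact h2.2.1 rfl
    · exact h2.2.2.1 rfl
  have hanw : a ≠ w := by
    intro hh
    exact hne ⟨rfl, hh⟩
  have := pvWordTerm q a w hqa hqw hanw [']'] (']' :: z)
  apply this
  simpa using hpre'

theorem pvPrefix_head (p l : List Char) (h : p <+: l) (c : Char) (hc : p[0]? = some c) :
    l[0]? = some c := by
  obtain ⟨r, rfl⟩ := h
  rw [List.getElem?_append_left (by cases p <;> simp_all)]
  exact hc

theorem pvPat_chunk_no_prefix (q q' : Char) (a w z : List Char)
    (hq : pvQuote q) (hq' : pvQuote q') (ha : pvWok a) (hw : pvWok w)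
    (hne : ¬ (q = q' ∧ a = w)) :
    ∀ k, k < (pvPat q' w).length → ¬ pvPat q a <+: ((pvPat q' w).drop k ++ z) := by
  intro k hk hpre
  cases k with
  | zero =>
    rw [List.drop_zero] at hpre
    exact pvTokNePrefix q q' a w hq hq' ha hw hne z hpre
  | succ k' =>
    have h0 : ((pvPat q' w).drop (k'+1) ++ z)[0]? = some '[' :=
      pvPrefix_head _ _ hpre '[' (by simp [pvPat])
    rw [List.getElem?_append_left (by simp; omega)] at h0
    rw [List.getElem?_drop] at h0
    exact pvPat_interior q' w hq' hw.2 (k'+1+0) (by omega) (by simpa using h0)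

def pvRun : List PvAtom → List Char
  | .chr c :: r => c :: pvRun r
  | _ => []

def pvRest : List PvAtom → List PvAtom
  | .chr _ :: r => pvRest r
  | x => x

theorem pvFlat_run_rest : ∀ atoms, pvFlat atoms = pvRun atoms ++ pvFlat (pvRest atoms)
  | [] => by simp [pvRun, pvRest, pvFlat]
  | .chr _ :: r => by
      simp only [pvFlat, pvRun, pvRest]
      rw [pvFlat_run_rest r]
      simp
  | .tok q w :: r => by simp [pvRun, pvRest]

theorem pvRest_shape : ∀ atoms, pvRest atoms = [] ∨ ∃ q w r', pvRest atoms = .tok q w :: r'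
  | [] => Or.inl rfl
  | .chr _ :: r => pvRest_shape r
  | .tok q w :: r => Or.inr ⟨q, w, r, rfl⟩

theorem pvFlat_rest_head (atoms : List PvAtom) :
    pvFlat (pvRest atoms) = [] ∨ (pvFlat (pvRest atoms))[0]? = some '[' := by
  rcases pvRest_shape atoms with h | ⟨q, w, r', h⟩
  · rw [h]; exact Or.inl rfl
  · rw [h]; exact Or.inr (by simp [pvFlat, pvPat])

theorem pvPrefixFlatRun (q : Char) (a : List Char) (hq : pvQuote q) (ha : pvWok a)
    (c : Char) (atoms : List PvAtom) :
    pvPat q a <+: pvFlat (.chr c :: atoms) ↔ pvPat q a <+: c :: pvRun atoms := by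
  have h1 : pvFlat (.chr c :: atoms) = (c :: pvRun atoms) ++ pvFlat (pvRest atoms) := by
    simp only [pvFlat]
    rw [pvFlat_run_rest atoms]
    simp
  rw [h1]
  exact pvPrefixStop _ _ _ (by simp) (pvFlat_rest_head atoms)
    (fun i hi => pvPat_interior q a hq ha.2 i hi)

-- invariants over atom lists
def pvGood : List PvAtom → Prop
  | [] => True
  | .chr _ :: r => pvGood r
  | .tok q w :: r => pvQuote q ∧ pvWok w ∧ pvGood r

def pvNS (keys : List (Char × List Char)) : List PvAtom → Prop
  | [] => True
  | .chr c :: r => (∀ k ∈ keys, ¬ pvPat k.1 k.2 <+: c :: pvRun r) ∧ pvNS keys r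
  | .tok _ _ :: r => pvNS keys r

def pvSubst1 (q : Char) (a b : List Char) : PvAtom → PvAtom
  | .tok q' w => if q' = q ∧ w = a then .tok q b else .tok q' w
  | x => x

theorem pvRun_map_subst (q : Char) (a b : List Char) :
    ∀ atoms, pvRun (atoms.map (pvSubst1 q a b)) = pvRun atoms
  | [] => rfl
  | .chr c :: r => by simp only [List.map_cons, pvSubst1, pvRun]; rw [pvRun_map_subst q a b r]
  | .tok q' w :: r => by
      simp only [List.map_cons, pvSubst1]
      split <;> simp [pvRun]

theorem pvNS_map_subst (keys : List (Char × List Char)) (q : Char) (a b : List Char) :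
    ∀ atoms, pvNS keys atoms → pvNS keys (atoms.map (pvSubst1 q a b))
  | [], h => trivial
  | .chr c :: r, h => by
      simp only [List.map_cons, pvSubst1] at *
      unfold pvNS at h ⊢
      refine ⟨?_, pvNS_map_subst keys q a b r h.2⟩
      intro k hk
      rw [pvRun_map_subst]
      exact h.1 k hk
  | .tok q' w :: r, h => by
      simp only [List.map_cons, pvSubst1] at *
      unfold pvNS at h
      split <;> (unfold pvNS; exact pvNS_map_subst keys q a b r h)

theorem pvGood_map_subst (q : Char) (a b : List Char) (hq : pvQuote q) (hb : pvWok b) :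
    ∀ atoms, pvGood atoms → pvGood (atoms.map (pvSubst1 q a b))
  | [], h => trivial
  | .chr c :: r, h => by
      simp only [List.map_cons, pvSubst1] at *
      unfold pvGood at h ⊢
      exact pvGood_map_subst q a b hq hb r h
  | .tok q' w :: r, h => by
      simp only [List.map_cons, pvSubst1] at *
      unfold pvGood at h
      split
      · rename_i hcond
        unfold pvGood
        exact ⟨hcond.1 ▸ h.1, hb, pvGood_map_subst q a b hq hb r h.2.2⟩
      · unfold pvGood
        exact ⟨h.1, h.2.1, pvGood_map_subst q a b hq hb r h.2.2⟩

-- flat unfolding lemmas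
theorem pvFlat_nil : pvFlat [] = [] := rfl
theorem pvFlat_chr (c : Char) (r : List PvAtom) : pvFlat (.chr c :: r) = c :: pvFlat r := rfl
theorem pvFlat_tok (q : Char) (w : List Char) (r : List PvAtom) :
    pvFlat (.tok q w :: r) = pvPat q w ++ pvFlat r := rfl

theorem pvRepl_match (q : Char) (a new z : List Char) :
    pvRepl '[' (q :: a ++ [q, ']']) new (pvPat q a ++ z) = new ++ pvRepl '[' (q :: a ++ [q, ']']) new z := by
  have h1 : pvPat q a ++ z = '[' :: ((q :: a ++ [q, ']']) ++ z) := by simp [pvPat]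
  rw [h1, pvRepl_cons]
  rw [if_pos (by rw [List.isPrefixOf_iff_prefix]; exact ⟨z, by simp⟩)]
  rw [List.drop_left]

theorem pvRepl_walk (q q' : Char) (a w new z : List Char)
    (hq : pvQuote q) (hq' : pvQuote q') (ha : pvWok a) (hw : pvWok w)
    (hne : ¬ (q = q' ∧ a = w)) :
    pvRepl '[' (q :: a ++ [q, ']']) new (pvPat q' w ++ z) = pvPat q' w ++ pvRepl '[' (q :: a ++ [q, ']']) new z := by
  apply pvRepl_append
  intro k hk
  have := pvPat_chunk_no_prefix q q' a w z hq hq' ha hw hne k hk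
  simpa [pvPat] using this

-- (ii) replace on the flattened atoms acts tokenwise
theorem pvReplFlat (q : Char) (a b : List Char) (hq : pvQuote q) (ha : pvWok a) (hb : pvWok b)
    (keys : List (Char × List Char)) (hkey : (q, a) ∈ keys) :
    ∀ atoms, pvGood atoms → pvNS keys atoms →
      pvRepl '[' (q :: a ++ [q, ']']) (pvPat q b) (pvFlat atoms) =
        pvFlat (atoms.map (pvSubst1 q a b))
  | [], _, _ => by simp [pvFlat_nil, pvRepl_nil]
  | .chr c :: r, hg, hns => by
      unfold pvGood at hg
      unfold pvNS at hns
      rw [pvFlat_chr, pvRepl_cons]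
      have hnp : ¬ ('[' :: (q :: a ++ [q, ']'])) <+: c :: pvFlat r := by
        have h2 := hns.1 (q, a) hkey
        intro hcon
        exact h2 (by
          rw [← pvPrefixFlatRun q a hq ha c r]
          rw [pvFlat_chr]
          simpa [pvPat] using hcon)
      rw [if_neg (by rw [List.isPrefixOf_iff_prefix]; exact hnp)]
      simp only [List.map_cons, pvSubst1, pvFlat_chr]
      rw [pvReplFlat q a b hq ha hb keys hkey r hg hns.2]
  | .tok q' w :: r, hg, hns => by
      unfold pvGood at hg
      unfold pvNS at hns
      rw [pvFlat_tok]
      by_cases heq : q' = q ∧ w = a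
      · obtain ⟨rfl, rfl⟩ := heq
        rw [pvRepl_match]
        have hs1 : pvSubst1 q' w b (.tok q' w) = .tok q' b := by simp [pvSubst1]
        simp only [List.map_cons, hs1, pvFlat_tok]
        rw [pvReplFlat q' w b hq ha hb keys hkey r hg.2.2 hns]
      · rw [pvRepl_walk q q' a w _ _ hq hg.1 ha hg.2.1 (by tauto)]
        have hs1 : pvSubst1 q a b (.tok q' w) = .tok q' w := by simp only [pvSubst1]; rw [if_neg (by tauto)]
        simp only [List.map_cons, hs1, pvFlat_tok]
        rw [pvReplFlat q a b hq ha hb keys hkey r hg.2.2 hns]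

theorem pvIsIn_true {p s : List Char} (h : p <:+: s) : PySem.Chars.isIn p s = true :=
  (PySem.Chars.isIn_iff_infix p s).mpr h
theorem pvIsIn_false {p s : List Char} (h : ¬ p <:+: s) : PySem.Chars.isIn p s = false :=
  (PySem.Chars.isIn_eq_false_iff p s).mpr h

-- (i) membership of a pattern in the flattened atoms is token presence
theorem pvIsInFlat (q : Char) (a : List Char) (hq : pvQuote q) (ha : pvWok a)
    (keys : List (Char × List Char)) (hkey : (q, a) ∈ keys) :
    ∀ atoms, pvGood atoms → pvNS keys atoms →
      PySem.Chars.isIn (pvPat q a) (pvFlat atoms) = atoms.any (fun x => x = .tok q a)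
  | [], _, _ => by
      rw [pvFlat_nil]
      simp only [List.any_nil]
      rw [PySem.Chars.isIn_eq_false_iff]
      intro hcon
      have := List.eq_nil_of_infix_nil hcon
      simp [pvPat] at this
  | .chr c :: r, hg, hns => by
      unfold pvGood at hg
      unfold pvNS at hns
      rw [pvFlat_chr]
      have hnp : ¬ pvPat q a <+: c :: pvFlat r := by
        intro hcon
        exact hns.1 (q, a) hkey (by
          rw [← pvPrefixFlatRun q a hq ha c r, pvFlat_chr]
          exact hcon)
      have hstep : PySem.Chars.isIn (pvPat q a) (c :: pvFlat r) = PySem.Chars.isIn (pvPat q a) (pvFlat r) := by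
        by_cases h : pvPat q a <:+: pvFlat r
        · rw [pvIsIn_true h, pvIsIn_true (List.infix_cons_iff.mpr (Or.inr h))]
        · rw [pvIsIn_false h, pvIsIn_false (by
            intro hcon
            rcases List.infix_cons_iff.mp hcon with h1 | h1
            · exact hnp h1
            · exact h h1)]
      rw [hstep]
      simp only [List.any_cons]
      have : ((PvAtom.chr c = PvAtom.tok q a) : Prop) = False := by simp
      simp only [this, decide_false, Bool.false_or]
      rw [pvIsInFlat q a hq ha keys hkey r hg hns.2]
  | .tok q' w :: r, hg, hns => by
      unfold pvGood at hg
      unfold pvNS at hns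
      rw [pvFlat_tok]
      by_cases heq : q' = q ∧ w = a
      · obtain ⟨rfl, rfl⟩ := heq
        have : pvPat q' w <:+: pvPat q' w ++ pvFlat r := (List.prefix_append _ _).isInfix
        rw [pvIsIn_true this]
        simp
      · have hstep : PySem.Chars.isIn (pvPat q a) (pvPat q' w ++ pvFlat r) = PySem.Chars.isIn (pvPat q a) (pvFlat r) := by
          by_cases h : pvPat q a <:+: pvFlat r
          · rw [pvIsIn_true h, pvIsIn_true (by
              rw [pvInfix_append_iff]
              exact Or.inr h)]
          · rw [pvIsIn_false h, pvIsIn_false (by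
              intro hcon
              rcases (pvInfix_append_iff _ _ _).mp hcon with ⟨k, hk, h1⟩ | h1
              · exact pvPat_chunk_no_prefix q q' a w (pvFlat r) hq hg.1 ha hg.2.1 (by tauto) k hk h1
              · exact h h1)]
        rw [hstep]
        simp only [List.any_cons]
        have : ((PvAtom.tok q' w = PvAtom.tok q a) : Prop) = False := by
          simp only [PvAtom.tok.injEq, eq_iff_iff, iff_false]
          tauto
        simp only [this, decide_false, Bool.false_or]
        rw [pvIsInFlat q a hq ha keys hkey r hg.2.2 hns]

theorem pvAny_map_subst (q : Char) (a b : List Char) (q1 : Char) (a1 : List Char)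
    (hk : ¬ (q = q1 ∧ a = a1)) (hb : b ≠ a1) :
    ∀ atoms : List PvAtom,
      (atoms.map (pvSubst1 q a b)).any (fun x => x = .tok q1 a1) = atoms.any (fun x => x = .tok q1 a1)
  | [] => rfl
  | .chr c :: r => by
      simp only [List.map_cons, pvSubst1, List.any_cons]
      rw [pvAny_map_subst q a b q1 a1 hk hb r]
  | .tok q' w :: r => by
      simp only [List.map_cons, pvSubst1, List.any_cons]
      rw [pvAny_map_subst q a b q1 a1 hk hb r]
      congr 1
      split
      · rename_i hc
        have h1 : ((PvAtom.tok q b = PvAtom.tok q1 a1) : Prop) = False := by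
          simp only [PvAtom.tok.injEq, eq_iff_iff, iff_false]
          rintro ⟨rfl, rfl⟩
          exact hb rfl
        have h2 : ((PvAtom.tok q' w = PvAtom.tok q1 a1) : Prop) = False := by
          simp only [PvAtom.tok.injEq, eq_iff_iff, iff_false]
          rintro ⟨rfl, rfl⟩
          exact hk ⟨hc.1.symm, hc.2.symm⟩
        simp only [h1, h2]
      · rfl

theorem pvMap_subst_id (q : Char) (a b : List Char) :
    ∀ atoms : List PvAtom, atoms.any (fun x => x = .tok q a) = false →
      atoms.map (pvSubst1 q a b) = atoms
  | [], _ => rfl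
  | .chr c :: r, h => by
      simp only [List.any_cons, Bool.or_eq_false_iff] at h
      simp only [List.map_cons, pvSubst1]
      rw [pvMap_subst_id q a b r h.2]
  | .tok q' w :: r, h => by
      simp only [List.any_cons, Bool.or_eq_false_iff] at h
      simp only [List.map_cons, pvSubst1]
      rw [pvMap_subst_id q a b r h.2]
      rw [if_neg (by
        rintro ⟨rfl, rfl⟩
        simp at h)]

def pvSeq : List (Char × List Char × List Char) → List PvAtom → List PvAtom
  | [], atoms => atoms
  | t :: ts, atoms => pvSeq ts (atoms.map (pvSubst1 t.1 t.2.1 t.2.2))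

theorem pvFold (keys : List (Char × List Char)) :
    ∀ ts : List (Char × List Char × List Char),
      (∀ t ∈ ts, pvQuote t.1 ∧ pvWok t.2.1 ∧ pvWok t.2.2) →
      ts.Pairwise (fun t t' => ¬ (t.1 = t'.1 ∧ t.2.1 = t'.2.1)) →
      (∀ t ∈ ts, ∀ t' ∈ ts, t.2.2 ≠ t'.2.1) →
      (∀ t ∈ ts, (t.1, t.2.1) ∈ keys) →
      ∀ atoms (k : Int), pvGood atoms → pvNS keys atoms →
        List.foldl pvStepX (pvFlat atoms, k) (ts.map (fun t => (pvPat t.1 t.2.1, pvPat t.1 t.2.2)))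
          = (pvFlat (pvSeq ts atoms),
             k + (ts.countP (fun t => atoms.any (fun x => x = .tok t.1 t.2.1)) : Int))
  | [], _, _, _, _, atoms, k, _, _ => by simp [pvSeq]
  | t :: ts, hwf, hkeys, hcross, hsub, atoms, k, hg, hns => by
      obtain ⟨q, a, b⟩ := t
      have hq : pvQuote q := (hwf (q, a, b) (by simp)).1
      have ha : pvWok a := (hwf (q, a, b) (by simp)).2.1
      have hb : pvWok b := (hwf (q, a, b) (by simp)).2.2
      have hk1 : (q, a) ∈ keys := hsub (q, a, b) (by simp)
      simp only [List.map_cons, List.foldl_cons]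
      have hstep : pvStepX (pvFlat atoms, k) (pvPat q a, pvPat q b)
          = (pvFlat (atoms.map (pvSubst1 q a b)),
             k + if atoms.any (fun x => x = .tok q a) then 1 else 0) := by
        unfold pvStepX
        simp only
        rw [pvIsInFlat q a hq ha keys hk1 atoms hg hns]
        by_cases hpres : atoms.any (fun x => x = .tok q a) = true
        · rw [if_pos hpres, if_pos hpres]
          have : pvPat q a = '[' :: (q :: a ++ [q, ']']) := rfl
          rw [this, pvReplaceEq]
          rw [pvReplFlat q a b hq ha hb keys hk1 atoms hg hns]
        · rw [if_neg hpres, if_neg hpres]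
          rw [pvMap_subst_id q a b atoms (Bool.eq_false_iff.mpr hpres)]
          simp
      rw [hstep]
      have ih := pvFold keys ts (fun t ht => hwf t (by simp [ht]))
        (List.pairwise_cons.mp hkeys).2
        (fun t ht t' ht' => hcross t (by simp [ht]) t' (by simp [ht']))
        (fun t ht => hsub t (by simp [ht]))
        (atoms.map (pvSubst1 q a b)) (k + if atoms.any (fun x => x = .tok q a) then 1 else 0)
        (pvGood_map_subst q a b hq hb atoms hg)
        (pvNS_map_subst keys q a b atoms hns)
      rw [ih]
      have hc : ts.countP (fun t => (atoms.map (pvSubst1 q a b)).any (fun x => x = .tok t.1 t.2.1))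
          = ts.countP (fun t => atoms.any (fun x => x = .tok t.1 t.2.1)) := by
        apply List.countP_congr
        intro t ht
        rw [pvAny_map_subst q a b t.1 t.2.1
          ((List.pairwise_cons.mp hkeys).1 t ht)
          (hcross (q, a, b) (by simp) t (by simp [ht]))]
      rw [hc]
      simp only [pvSeq, List.countP_cons]
      congr 1
      push_cast
      split <;> omega

def pvParseGo : Nat → List Char → List PvAtom
  | _, [] => []
  | 0, _ => []
  | fuel+1, c :: t =>
    match t with
    | q :: rest =>
      if c = '[' ∧ (q = '\'' ∨ q = '"') then
        let w := rest.takeWhile pvWordChar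
        match rest.drop w.length with
        | q2 :: b :: rest' =>
          if w ≠ [] ∧ q2 = q ∧ b = ']' then
            match pvLookup w with
            | some _ => .tok q w :: pvParseGo fuel rest'
            | none => .chr c :: pvParseGo fuel t
          else .chr c :: pvParseGo fuel t
        | _ => .chr c :: pvParseGo fuel t
      else .chr c :: pvParseGo fuel t
    | [] => .chr c :: pvParseGo fuel t

theorem pvTakeWhileWord (q : Char) (hq : pvWordChar q = false) :
    ∀ (a y : List Char), a.all pvWordChar = true → (a ++ q :: y).takeWhile pvWordChar = a
  | [], y, _ => by simp [hq]
  | c :: a', y, h => by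
      simp only [List.all_cons, Bool.and_eq_true] at h
      simp only [List.cons_append, List.takeWhile_cons, h.1, if_true]
      rw [pvTakeWhileWord q hq a' y h.2]

theorem pvFlatParse : ∀ (fuel : Nat) (s : List Char), s.length ≤ fuel →
    pvFlat (pvParseGo fuel s) = s := by
  intro fuel
  induction fuel with
  | zero =>
    intro s h
    have : s = [] := by cases s <;> simp_all
    subst this; rfl
  | succ n ih =>
    intro s h
    cases s with
    | nil => rfl
    | cons c t =>
      cases t with
      | nil =>
        simp only [pvParseGo, pvFlat]
      | cons q rest =>
        simp only [pvParseGo]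
        by_cases h1 : c = '[' ∧ (q = '\'' ∨ q = '"')
        · rw [if_pos h1]
          cases hdrop : rest.drop (rest.takeWhile pvWordChar).length with
          | nil =>
            simp only [pvFlat]
            rw [ih (q :: rest) (by simp at h ⊢; omega)]
          | cons q2 t2 =>
            cases t2 with
            | nil =>
              simp only [pvFlat]
              rw [ih (q :: rest) (by simp at h ⊢; omega)]
            | cons b rest' =>
              dsimp only
              by_cases h2 : rest.takeWhile pvWordChar ≠ [] ∧ q2 = q ∧ b = ']'
              · rw [if_pos h2]
                cases hlook : pvLookup (rest.takeWhile pvWordChar) with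
                | some std =>
                  simp only [pvFlat]
                  rw [ih rest' (by
                    have := congrArg List.length hdrop
                    have h3 := List.length_drop (l := rest) (i := (rest.takeWhile pvWordChar).length)
                    simp at this h3 ⊢
                    simp at h
                    omega)]
                  obtain ⟨hw, rfl, rfl⟩ := h2
                  obtain ⟨rfl, -⟩ := h1
                  have hpre2 := List.takeWhile_prefix (p := pvWordChar) (l := rest)
                  have htake : rest.take (rest.takeWhile pvWordChar).length = rest.takeWhile pvWordChar :=
                    (List.prefix_iff_eq_take.mp hpre2).symm
                  have : rest = rest.takeWhile pvWordChar ++ (q2 :: ']' :: rest') := by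
                    conv_lhs => rw [← List.take_append_drop (rest.takeWhile pvWordChar).length rest]
                    rw [htake, hdrop]
                  conv_rhs => rw [this]
                  simp [pvPat]
                | none =>
                  simp only [pvFlat]
                  rw [ih (q :: rest) (by simp at h ⊢; omega)]
              · rw [if_neg h2]
                simp only [pvFlat]
                rw [ih (q :: rest) (by simp at h ⊢; omega)]
        · rw [if_neg h1]
          simp only [pvFlat]
          rw [ih (q :: rest) (by simp at h ⊢; omega)]

def pvTriples : List (Char × List Char × List Char) :=
  pvAliasItems.flatMap (fun p => [('\'', p.1.toList, p.2.toList), ('"', p.1.toList, p.2.toList)])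

def pvKeysAll : List (Char × List Char) := pvTriples.map (fun t => (t.1, t.2.1))

theorem pvKeysAll_spec : ∀ k ∈ pvKeysAll, pvQuote k.1 ∧ pvWok k.2 ∧ pvLookup k.2 ≠ none := by decide

theorem pvQuote_not_word (q : Char) (hq : pvQuote q) : pvWordChar q = false := by
  rcases hq with rfl | rfl <;> decide

theorem pvForce (q : Char) (a : List Char) (c : Char) (t : List Char)
    (hpre : pvPat q a <+: c :: t) :
    c = '[' ∧ ∃ z, t = q :: (a ++ q :: ']' :: z) := by
  have hpp : pvPat q a = '[' :: (q :: (a ++ [q, ']'])) := by simp [pvPat]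
  rw [hpp, List.cons_prefix_cons] at hpre
  obtain ⟨rfl, hpre⟩ := hpre
  cases t with
  | nil => exact absurd hpre (by simp)
  | cons x t' =>
    rw [List.cons_prefix_cons] at hpre
    obtain ⟨rfl, hpre⟩ := hpre
    obtain ⟨z, hz⟩ := hpre
    refine ⟨rfl, z, ?_⟩
    rw [← hz]
    simp

theorem pvRun_prefix (atoms : List PvAtom) : pvRun atoms <+: pvFlat atoms :=
  ⟨pvFlat (pvRest atoms), (pvFlat_run_rest atoms).symm⟩

def pvToksOk (atoms : List PvAtom) : Prop :=
  ∀ q w, PvAtom.tok q w ∈ atoms → pvQuote q ∧ pvLookup w ≠ none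


theorem pvForceAll (k : Char × List Char) (hk : k ∈ pvKeysAll) (c : Char) (t : List Char)
    (hpre : pvPat k.1 k.2 <+: c :: t) :
    c = '[' ∧ ∃ z, t = k.1 :: (k.2 ++ k.1 :: ']' :: z) ∧
      (k.2 ++ k.1 :: ']' :: z).takeWhile pvWordChar = k.2 ∧
      (k.2 ++ k.1 :: ']' :: z).drop k.2.length = k.1 :: ']' :: z ∧
      pvQuote k.1 ∧ k.2 ≠ [] ∧ pvLookup k.2 ≠ none := by
  obtain ⟨hq, hw, hl⟩ := pvKeysAll_spec k hk
  obtain ⟨rfl, z, hz⟩ := pvForce k.1 k.2 c t hpre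
  refine ⟨rfl, z, hz, ?_, ?_, hq, hw.1, hl⟩
  · exact pvTakeWhileWord k.1 (pvQuote_not_word k.1 hq) k.2 (']' :: z) hw.2
  · simp

-- at every chr position of the parse no alias pattern starts
theorem pvParse_inv : ∀ (fuel : Nat) (s : List Char), s.length ≤ fuel →
    pvNS pvKeysAll (pvParseGo fuel s) ∧ pvToksOk (pvParseGo fuel s) := by
  intro fuel
  induction fuel with
  | zero =>
    intro s h
    have : s = [] := by cases s <;> simp_all
    subst this
    exact ⟨trivial, by intro q w hm; simp [pvParseGo] at hm⟩
  | succ n ih =>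
    intro s h
    -- generic helper: the chr-cons case
    have hchr : ∀ (c : Char) (t : List Char), t.length ≤ n →
        (¬ ∃ k, k ∈ pvKeysAll ∧ pvPat k.1 k.2 <+: c :: t) →
        pvNS pvKeysAll (.chr c :: pvParseGo n t) ∧ pvToksOk (.chr c :: pvParseGo n t) := by
      intro c t ht hno
      refine ⟨⟨?_, (ih t ht).1⟩, ?_⟩
      · intro k hk hpre
        apply hno
        refine ⟨k, hk, ?_⟩
        have h1 : c :: pvRun (pvParseGo n t) <+: c :: t := by
          have h2 := pvRun_prefix (pvParseGo n t)
          rw [pvFlatParse n t ht] at h2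
          exact List.cons_prefix_cons.mpr ⟨rfl, h2⟩
        exact hpre.trans h1
      · intro q w hm
        rw [List.mem_cons] at hm
        rcases hm with hm | hm
        · exact absurd hm (by simp)
        · exact (ih t ht).2 q w hm
    cases s with
    | nil => exact ⟨trivial, by intro q w hm; simp [pvParseGo] at hm⟩
    | cons c t =>
      cases t with
      | nil =>
        have hred : pvParseGo (n+1) [c] = .chr c :: pvParseGo n [] := rfl
        rw [hred]
        apply hchr c [] (by simp)
        rintro ⟨k, hk, hpre⟩
        obtain ⟨-, z, hz, -⟩ := pvForceAll k hk c [] hpre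
        simp at hz
      | cons q rest =>
        have hlt : (q :: rest).length ≤ n := by simp at h ⊢; omega
        simp only [pvParseGo]
        by_cases h1 : c = '[' ∧ (q = '\'' ∨ q = '"')
        · rw [if_pos h1]
          cases hdrop : rest.drop (rest.takeWhile pvWordChar).length with
          | nil =>
            apply hchr c (q :: rest) hlt
            rintro ⟨k, hk, hpre⟩
            obtain ⟨-, z, hz, htw, hdr, -⟩ := pvForceAll k hk c (q :: rest) hpre
            obtain ⟨rfl, hrest⟩ : q = k.1 ∧ rest = k.2 ++ k.1 :: ']' :: z := by
              rw [List.cons_eq_cons] at hz; exact ⟨hz.1.symm ▸ rfl, hz.2⟩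
            rw [hrest, htw, hdr] at hdrop
            exact absurd hdrop (by simp)
          | cons q2 t2 =>
            cases t2 with
            | nil =>
              apply hchr c (q :: rest) hlt
              rintro ⟨k, hk, hpre⟩
              obtain ⟨-, z, hz, htw, hdr, -⟩ := pvForceAll k hk c (q :: rest) hpre
              obtain ⟨rfl, hrest⟩ : q = k.1 ∧ rest = k.2 ++ k.1 :: ']' :: z := by
                rw [List.cons_eq_cons] at hz; exact ⟨hz.1.symm ▸ rfl, hz.2⟩
              rw [hrest, htw, hdr] at hdrop
              exact absurd hdrop (by simp)
            | cons b rest' =>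
              dsimp only
              by_cases h2 : rest.takeWhile pvWordChar ≠ [] ∧ q2 = q ∧ b = ']'
              · rw [if_pos h2]
                cases hlook : pvLookup (rest.takeWhile pvWordChar) with
                | some std =>
                  have hlen' : rest'.length ≤ n := by
                    have := congrArg List.length hdrop
                    have h3 := List.length_drop (l := rest) (i := (rest.takeWhile pvWordChar).length)
                    simp at this h3 h ⊢
                    omega
                  refine ⟨(ih rest' hlen').1, ?_⟩
                  intro q' w' hm
                  rw [List.mem_cons] at hm
                  rcases hm with hm | hm
                  · injection hm with e1 e2
                    subst e1; subst e2
                    exact ⟨h1.2, by rw [hlook]; simp⟩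
                  · exact (ih rest' hlen').2 q' w' hm
                | none =>
                  apply hchr c (q :: rest) hlt
                  rintro ⟨k, hk, hpre⟩
                  obtain ⟨-, z, hz, htw, hdr, -, -, hl⟩ := pvForceAll k hk c (q :: rest) hpre
                  obtain ⟨rfl, hrest⟩ : q = k.1 ∧ rest = k.2 ++ k.1 :: ']' :: z := by
                    rw [List.cons_eq_cons] at hz; exact ⟨hz.1.symm ▸ rfl, hz.2⟩
                  rw [hrest, htw] at hlook
                  exact hl hlook
              · rw [if_neg h2]
                apply hchr c (q :: rest) hlt
                rintro ⟨k, hk, hpre⟩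
                obtain ⟨-, z, hz, htw, hdr, -, hne, -⟩ := pvForceAll k hk c (q :: rest) hpre
                obtain ⟨rfl, hrest⟩ : q = k.1 ∧ rest = k.2 ++ k.1 :: ']' :: z := by
                  rw [List.cons_eq_cons] at hz; exact ⟨hz.1.symm ▸ rfl, hz.2⟩
                rw [hrest, htw, hdr] at hdrop
                rw [List.cons_eq_cons] at hdrop
                obtain ⟨rfl, hdrop⟩ := hdrop
                rw [List.cons_eq_cons] at hdrop
                obtain ⟨rfl, -⟩ := hdrop
                apply h2
                rw [hrest, htw]
                exact ⟨hne, rfl, rfl⟩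
        · rw [if_neg h1]
          apply hchr c (q :: rest) hlt
          rintro ⟨k, hk, hpre⟩
          obtain ⟨hc, z, hz, -, -, hq, -⟩ := pvForceAll k hk c (q :: rest) hpre
          obtain ⟨rfl, -⟩ : q = k.1 ∧ rest = k.2 ++ k.1 :: ']' :: z := by
            rw [List.cons_eq_cons] at hz; exact ⟨hz.1.symm ▸ rfl, hz.2⟩
          exact h1 ⟨hc, hq⟩

def pvPoint : List (Char × List Char × List Char) → PvAtom → PvAtom
  | [], x => x
  | t :: ts, x => pvPoint ts (pvSubst1 t.1 t.2.1 t.2.2 x)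

theorem pvSeq_eq_map : ∀ (ts : List (Char × List Char × List Char)) (atoms : List PvAtom),
    pvSeq ts atoms = atoms.map (pvPoint ts)
  | [], atoms => by simp [pvSeq, pvPoint]
  | t :: ts, atoms => by
      simp only [pvSeq]
      rw [pvSeq_eq_map ts]
      rw [List.map_map]
      rfl

-- concrete facts about the alias table, verified by computation
theorem pvItems_spec : ∀ p ∈ pvAliasItems,
    pvWok p.1.toList ∧ pvWok p.2.toList ∧
    (('\'', p.1.toList) ∈ pvKeysAll) ∧ (('"', p.1.toList) ∈ pvKeysAll) ∧
    pvPoint pvTriples (.tok '\'' p.1.toList) = .tok '\'' p.2.toList ∧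
    pvPoint pvTriples (.tok '"' p.1.toList) = .tok '"' p.2.toList := by decide

theorem pvLookup_spec (w b : List Char) (h : pvLookup w = some b) :
    ∃ p ∈ pvAliasItems, p.1.toList = w ∧ p.2.toList = b := by
  unfold pvLookup at h
  cases hf : pvAliasItems.find? (fun p => p.1.toList == w) with
  | none => rw [hf] at h; simp at h
  | some p =>
    rw [hf] at h
    simp only [Option.map_some, Option.some_inj] at h
    exact ⟨p, List.mem_of_find?_eq_some hf, by simpa using List.find?_some hf, h⟩

theorem pvLookup_facts (w b : List Char) (h : pvLookup w = some b) :
    pvWok w ∧ pvWok b ∧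
    (∀ q, pvQuote q → (q, w) ∈ pvKeysAll ∧ pvPoint pvTriples (.tok q w) = .tok q b) := by
  obtain ⟨p, hp, hw, hb⟩ := pvLookup_spec w b h
  obtain ⟨h1, h2, h3, h4, h5, h6⟩ := pvItems_spec p hp
  subst hw; subst hb
  refine ⟨h1, h2, ?_⟩
  rintro q (rfl | rfl)
  · exact ⟨h3, h5⟩
  · exact ⟨h4, h6⟩

theorem pvGood_of : ∀ atoms : List PvAtom,
    (∀ q w, PvAtom.tok q w ∈ atoms → pvQuote q ∧ pvWok w) → pvGood atoms
  | [], _ => trivial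
  | .chr c :: r, h => pvGood_of r (fun q w hm => h q w (by simp [hm]))
  | .tok q w :: r, h => by
      have := h q w (by simp)
      exact ⟨this.1, this.2, pvGood_of r (fun q' w' hm => h q' w' (by simp [hm]))⟩

theorem pvGood_parse (atoms : List PvAtom) (h : pvToksOk atoms) : pvGood atoms := by
  apply pvGood_of
  intro q w hm
  obtain ⟨hq, hl⟩ := h q w hm
  cases hlk : pvLookup w with
  | none => exact absurd hlk hl
  | some b => exact ⟨hq, (pvLookup_facts w b hlk).1⟩

def pvPairs : List PvAtom → List (List Char × Char)
  | [] => []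
  | .chr _ :: r => pvPairs r
  | .tok q w :: r => (w, q) :: pvPairs r

theorem pvPairs_any (q : Char) (a : List Char) :
    ∀ atoms : List PvAtom, (atoms.any (fun x => x = .tok q a) = true) ↔ (a, q) ∈ pvPairs atoms
  | [] => by simp [pvPairs]
  | .chr c :: r => by
      simp only [List.any_cons, pvPairs]
      rw [← pvPairs_any q a r]
      simp
  | .tok q' w :: r => by
      simp only [List.any_cons, pvPairs]
      rw [List.mem_cons, ← pvPairs_any q a r]
      simp only [Bool.or_eq_true, decide_eq_true_eq]
      constructor
      · rintro (h | h)
        · injection h with e1 e2; exact Or.inl (by rw [e1, e2])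
        · exact Or.inr h
      · rintro (h | h)
        · rw [Prod.mk.injEq] at h; exact Or.inl (by rw [h.1, h.2])
        · exact Or.inr h

theorem pvPairs_mem (a : List Char) (q : Char) :
    ∀ atoms : List PvAtom, (a, q) ∈ pvPairs atoms → PvAtom.tok q a ∈ atoms := by
  intro atoms h
  rw [← pvPairs_any q a atoms] at h
  simpa using h

theorem pvCount {β : Type} [DecidableEq β] (S keys : List β) (p : β → Bool)
    (hp : ∀ x, p x = true ↔ x ∈ S)
    (hk : keys.Nodup) (hs : S.Nodup) (hsub : ∀ x ∈ S, x ∈ keys) :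
    keys.countP p = S.length := by
  rw [List.countP_eq_length_filter]
  have hperm : List.Perm (keys.filter p) S := by
    apply List.perm_of_nodup_nodup_toFinset_eq (hk.filter _) hs
    ext x
    simp only [List.mem_toFinset, List.mem_filter]
    rw [hp x]
    exact ⟨fun h => h.2, fun h => ⟨hsub x h, h⟩⟩
  exact hperm.length_eq

def pvSubstB : PvAtom → PvAtom
  | .tok q w =>
    match pvLookup w with
    | some b => .tok q b
    | none => .tok q w
  | x => x

theorem pvScan_eq : ∀ (fuel : Nat) (s out : List Char) (seen : PySem.Set (List Char × Char)),
    s.length ≤ fuel →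
    pvScanGo fuel s out seen =
      (out ++ pvFlat ((pvParseGo fuel s).map pvSubstB),
       List.foldl PySem.Set.add seen (pvPairs (pvParseGo fuel s))) := by
  intro fuel
  induction fuel with
  | zero =>
    intro s out seen h
    have : s = [] := by cases s <;> simp_all
    subst this
    simp [pvScanGo, pvParseGo, pvFlat, pvPairs]
  | succ n ih =>
    intro s out seen h
    cases s with
    | nil => simp [pvScanGo, pvParseGo, pvFlat, pvPairs]
    | cons c t =>
      cases t with
      | nil =>
        have hr1 : pvScanGo (n+1) [c] out seen = pvScanGo n [] (out ++ [c]) seen := rfl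
        have hr2 : pvParseGo (n+1) [c] = .chr c :: pvParseGo n [] := rfl
        rw [hr1, hr2, ih [] (out ++ [c]) seen (by simp)]
        simp [pvSubstB, pvFlat, pvPairs, pvParseGo]
      | cons q rest =>
        have hlt : (q :: rest).length ≤ n := by simp at h ⊢; omega
        simp only [pvScanGo, pvParseGo]
        by_cases h1 : c = '[' ∧ (q = '\'' ∨ q = '"')
        · rw [if_pos h1, if_pos h1]
          cases hdrop : rest.drop (rest.takeWhile pvWordChar).length with
          | nil =>
            rw [ih (q :: rest) (out ++ [c]) seen hlt]
            simp only [List.map_cons, pvSubstB, pvFlat_chr, pvPairs]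
            simp
          | cons q2 t2 =>
            cases t2 with
            | nil =>
              rw [ih (q :: rest) (out ++ [c]) seen hlt]
              simp only [List.map_cons, pvSubstB, pvFlat_chr, pvPairs]
              simp
            | cons b rest' =>
              dsimp only
              by_cases h2 : rest.takeWhile pvWordChar ≠ [] ∧ q2 = q ∧ b = ']'
              · rw [if_pos h2, if_pos h2]
                cases hlook : pvLookup (rest.takeWhile pvWordChar) with
                | some std =>
                  dsimp only
                  have hlen' : rest'.length ≤ n := by
                    have := congrArg List.length hdrop
                    have h3 := List.length_drop (l := rest) (i := (rest.takeWhile pvWordChar).length)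
                    simp at this h3 h ⊢
                    omega
                  rw [ih rest' (out ++ ('[' :: q :: std ++ [q, ']'])) (PySem.Set.add seen (rest.takeWhile pvWordChar, q)) hlen']
                  simp only [List.map_cons, pvSubstB, hlook, pvFlat_tok, pvPairs]
                  simp only [List.foldl_cons]
                  rw [Prod.mk.injEq]
                  refine ⟨?_, rfl⟩
                  simp [pvPat]
                | none =>
                  dsimp only
                  rw [ih (q :: rest) (out ++ [c]) seen hlt]
                  simp only [List.map_cons, pvSubstB, pvFlat_chr, pvPairs]
                  simp
              · rw [if_neg h2, if_neg h2]
                rw [ih (q :: rest) (out ++ [c]) seen hlt]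
                simp only [List.map_cons, pvSubstB, pvFlat_chr, pvPairs]
                simp
        · rw [if_neg h1, if_neg h1]
          rw [ih (q :: rest) (out ++ [c]) seen hlt]
          simp only [List.map_cons, pvSubstB, pvFlat_chr, pvPairs]
          simp

def pvKeysSw : List (List Char × Char) := pvTriples.map (fun t => (t.2.1, t.1))

theorem pvItems_spec2 : ∀ p ∈ pvAliasItems,
    (p.1.toList, '\'') ∈ pvKeysSw ∧ (p.1.toList, '"') ∈ pvKeysSw := by decide

theorem pvKeysSw_nodup : pvKeysSw.Nodup := by decide

theorem pvTriples_wf : ∀ t ∈ pvTriples, pvQuote t.1 ∧ pvWok t.2.1 ∧ pvWok t.2.2 := by decide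

theorem pvTriples_pairwise : pvTriples.Pairwise (fun t t' => ¬ (t.1 = t'.1 ∧ t.2.1 = t'.2.1)) := by decide

theorem pvTriples_cross : ∀ t ∈ pvTriples, ∀ t' ∈ pvTriples, t.2.2 ≠ t'.2.1 := by decide

theorem pvTriples_keys : ∀ t ∈ pvTriples, (t.1, t.2.1) ∈ pvKeysAll := by decide

theorem pvPoint_chr (c : Char) : ∀ ts, pvPoint ts (.chr c) = .chr c
  | [] => rfl
  | t :: ts => by simp only [pvPoint, pvSubst1]; exact pvPoint_chr c ts

theorem pvMap_point_eq_substB (atoms : List PvAtom) (h : pvToksOk atoms) :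
    atoms.map (pvPoint pvTriples) = atoms.map pvSubstB := by
  apply List.map_congr_left
  intro x hx
  cases x with
  | chr c => rw [pvPoint_chr]; rfl
  | tok q w =>
    obtain ⟨hq, hl⟩ := h q w hx
    cases hlk : pvLookup w with
    | none => exact absurd hlk hl
    | some b =>
      rw [((pvLookup_facts w b hlk).2.2 q hq).2]
      simp [pvSubstB, hlk]

-- the count a-side equals the number of distinct (word, quote) pairs
theorem pvCount_eq (atoms : List PvAtom) (h : pvToksOk atoms) :
    pvTriples.countP (fun t => atoms.any (fun x => x = .tok t.1 t.2.1))
      = (PySem.Set.ofList (pvPairs atoms)).length := by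
  have h2 : pvTriples.countP (fun t => atoms.any (fun x => x = .tok t.1 t.2.1))
      = pvKeysSw.countP (fun x => atoms.any (fun y => y = .tok x.2 x.1)) := by
    rw [pvKeysSw, List.countP_map]
    rfl
  rw [h2]
  apply pvCount
  · intro x
    rw [PySem.Set.mem_ofList]
    exact pvPairs_any x.2 x.1 atoms
  · exact pvKeysSw_nodup
  · exact PySem.Set.nodup_ofList _
  · intro x hx
    rw [PySem.Set.mem_ofList] at hx
    obtain ⟨w, q⟩ := x
    have hm := pvPairs_mem w q atoms hx
    obtain ⟨hq, hl⟩ := h q w hm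
    cases hlk : pvLookup w with
    | none => exact absurd hlk hl
    | some b =>
      obtain ⟨p, hp, hw, -⟩ := pvLookup_spec w b hlk
      obtain ⟨hs1, hs2⟩ := pvItems_spec2 p hp
      rcases hq with rfl | rfl
      · exact hw ▸ hs1
      · exact hw ▸ hs2

theorem pvFoldl_flat {α β σ : Type} (f : σ → β → σ) (g : α → List β) :
    ∀ (l : List α) (init : σ),
      l.foldl (fun st p => (g p).foldl f st) init = (l.flatMap g).foldl f init
  | [], init => rfl
  | a :: l, init => by
      simp only [List.foldl_cons, List.flatMap_cons, List.foldl_append]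
      exact pvFoldl_flat f g l _

theorem pvPairsEq : pvAliasItems.flatMap (fun p =>
      [ ('[' :: '\'' :: p.1.toList ++ ['\'', ']'], '[' :: '\'' :: p.2.toList ++ ['\'', ']']),
        ('[' :: '"' :: p.1.toList ++ ['"', ']'], '[' :: '"' :: p.2.toList ++ ['"', ']']) ])
    = pvTriples.map (fun t => (pvPat t.1 t.2.1, pvPat t.1 t.2.2)) := by decide


theorem pvMain (code : String) : Spec_adapt_field_references code (adapt_field_references code) := by
  unfold Spec_adapt_field_references
  unfold adapt_field_references adapt_field_references_alt
  by_cases hc : code = ""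
  · rw [if_pos hc, if_pos hc]
  · rw [if_neg hc, if_neg hc]
    have hinv := pvParse_inv code.toList.length code.toList le_rfl
    have hflat := pvFlatParse code.toList.length code.toList le_rfl
    have hgood := pvGood_parse _ hinv.2
    have hA := pvFoldl_flat pvStepX (fun p =>
      [ ('[' :: '\'' :: p.1.toList ++ ['\'', ']'], '[' :: '\'' :: p.2.toList ++ ['\'', ']']),
        ('[' :: '"' :: p.1.toList ++ ['"', ']'], '[' :: '"' :: p.2.toList ++ ['"', ']']) ])
      pvAliasItems (code.toList, (0 : Int))
    rw [pvPairsEq] at hA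
    have hfold := pvFold pvKeysAll pvTriples pvTriples_wf pvTriples_pairwise pvTriples_cross
      pvTriples_keys (pvParseGo code.toList.length code.toList) 0 hgood hinv.1
    rw [hflat] at hfold
    rw [hA, hfold]
    have hB := pvScan_eq code.toList.length code.toList [] PySem.Set.empty le_rfl
    rw [hB]
    rw [Prod.mk.injEq]
    constructor
    · rw [pvSeq_eq_map, pvMap_point_eq_substB _ hinv.2]
      simp
    · have : List.foldl PySem.Set.add PySem.Set.empty (pvPairs (pvParseGo code.toList.length code.toList))
          = PySem.Set.ofList (pvPairs (pvParseGo code.toList.length code.toList)) :=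
        (PySem.Set.ofList_eq_foldl _).symm
      rw [this]
      unfold PySem.Set.len
      rw [← pvCount_eq _ hinv.2]
      simp

-- ===== VERDICT (by name: the statement is the Claim_ definition above) =====
theorem adapt_field_references_spec : Claim_equal_adapt_field_references := by
  intro code _
  exact pvMain code
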